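-- pv_equiv track=rewrite | github.com/pavanyewale/Assembler | symboltable.py | constr
-- ===== SOURCE A (Python) =====
-- def constr(val2):
--     val3=','.join(val2)
--     val4=val3.split(',')
--     val5=[]
--
--     for i in range(len(val4)):
--         if(val4[i]=='0'):
--             for j in range(i):
--                 val5.append(val4[j])
--
--     val6=','.join(val5)
--     val7=val6.replace(","," ")
--     val8=val7.replace('"','')
--     return val8
-- ===== SOURCE B (Python) =====
-- def constr(val2):
--     s = ','.join(val2)
--     pieces = []
--     pos = 0
--     for tok in s.split(','):
--         if tok == '0' and pos > 0:
--             pieces.append(s[:pos - 1])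
--         pos += len(tok) + 1
--     val6 = ','.join(pieces)
--     return val6.replace(',', ' ').replace('"', '')
-- ===== Notes on version B (the rewrite author's own statement) =====
-- stated objective: alternative
-- what changed: Instead of materialising the prefix token-by-token with a nested index loop, B never rebuilds prefixes at token level at all: it tracks a running character offset into the joined string and, at each '0' token, takes one string slice s[:pos-1] of the joined string (the comma-joined prefix) as a single ready-made piece.
import Mathlib
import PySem

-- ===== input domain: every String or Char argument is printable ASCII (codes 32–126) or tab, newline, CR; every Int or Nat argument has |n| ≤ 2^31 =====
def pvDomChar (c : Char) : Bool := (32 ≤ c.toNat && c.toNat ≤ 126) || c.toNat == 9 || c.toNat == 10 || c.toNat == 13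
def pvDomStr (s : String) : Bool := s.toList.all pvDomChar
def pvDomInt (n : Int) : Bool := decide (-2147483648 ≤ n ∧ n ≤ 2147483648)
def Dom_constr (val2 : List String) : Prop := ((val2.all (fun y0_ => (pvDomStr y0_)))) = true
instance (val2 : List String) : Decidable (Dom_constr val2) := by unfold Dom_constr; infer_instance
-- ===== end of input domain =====

-- B replaces A's nested token-copying loop by tracking a running character offset into the joined
-- string and taking one slice s[:pos-1] per '0' token (return value only; neither mutates its argument).

-- ===== PORT A =====
def constr (val2 : List String) : String :=
  let val3 := PySem.Str.join "," val2
  let val4 := (PySem.Str.split? val3 ",").getD []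
  let val5 := (PySem.List.pyRange 0 (val4.length : Int) 1).foldl
    (fun val5 i =>
      if PySem.List.pyGetD val4 i "" == "0" then
        (PySem.List.pyRange 0 i 1).foldl (fun val5 j => val5 ++ [PySem.List.pyGetD val4 j ""]) val5
      else val5) []
  let val6 := PySem.Str.join "," val5
  let val7 := PySem.Str.replace val6 "," " "
  let val8 := PySem.Str.replace val7 "\"" ""
  val8

-- ===== PORT B =====
def constr_alt (val2 : List String) : String :=
  let s := PySem.Str.join "," val2
  let toks := (PySem.Str.split? s ",").getD []
  let st := toks.foldl
    (fun st tok =>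
      (st.1 + PySem.Str.len tok + 1,
       if tok == "0" && decide ((0:Int) < st.1) then
         st.2 ++ [PySem.Str.slice s none (some (st.1 - 1))]
       else st.2))
    ((0 : Int), ([] : List String))
  let val6 := PySem.Str.join "," st.2
  PySem.Str.replace (PySem.Str.replace val6 "," " ") "\"" ""

-- ===== PRECONDITION & SPEC =====
def Spec_constr (val2 : List String) (out : String) : Prop := out = constr_alt val2
instance (val2 : List String) (out : String) : Decidable (Spec_constr val2 out) := by unfold Spec_constr; infer_instance

-- ===== CLAIM (what is proved, stated in full; the proofs are below) =====
def Claim_equal_constr : Prop := ∀ (val2 : List String), Dom_constr val2 → Spec_constr val2 (constr val2)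

-- ===== LEMMAS AND PROOFS =====

-- running character offset of token k in ','-joined l (Python's pos after k tokens)
def pvPos (l : List String) (k : Nat) : Int := ((l.take k).map PySem.Str.len).sum + k

-- join of a cons with nonempty tail
lemma pvJoinCons (sep a : List Char) (M : List (List Char)) (h : M ≠ []) :
    PySem.Chars.join sep (a :: M) = a ++ sep ++ PySem.Chars.join sep M := by
  cases M with
  | nil => exact absurd rfl h
  | cons b t => exact PySem.Chars.join_cons_cons sep a b t

lemma pvJoinAppend (sep : List Char) (A B : List (List Char)) (hA : A ≠ []) (hB : B ≠ []) :
    PySem.Chars.join sep (A ++ B) = PySem.Chars.join sep A ++ sep ++ PySem.Chars.join sep B := by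
  induction A with
  | nil => exact absurd rfl hA
  | cons a A ih =>
    cases A with
    | nil => simp [pvJoinCons sep a B hB, PySem.Chars.join_singleton]
    | cons a' A' =>
      rw [List.cons_append, pvJoinCons sep a ((a' :: A') ++ B) (by simp),
          ih (by simp), PySem.Chars.join_cons_cons]
      simp [List.append_assoc]

lemma pvJoinSnoc2 (sep : List Char) (A : List (List Char)) (x y : List Char) :
    PySem.Chars.join sep (A ++ [x, y]) = PySem.Chars.join sep (A ++ [x ++ sep ++ y]) := by
  induction A with
  | nil => simp [PySem.Chars.join_cons_cons, PySem.Chars.join_singleton]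
  | cons a A ih =>
    rw [List.cons_append, List.cons_append, pvJoinCons sep a (A ++ [x, y]) (by simp),
        pvJoinCons sep a (A ++ [x ++ sep ++ y]) (by simp), ih]

lemma pvGoJoin (sep : List Char) (hsep : sep ≠ []) :
    ∀ (fuel : Nat) (l cur : List Char) (acc : List (List Char)), l.length < fuel →
      PySem.Chars.join sep (PySem.Chars.splitOn.go sep fuel l cur acc) =
      PySem.Chars.join sep (acc.reverse ++ [cur.reverse ++ l]) := by
  intro fuel
  induction fuel with
  | zero => intro l cur acc h; omega
  | succ fuel ih =>
    intro l cur acc h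
    cases l with
    | nil =>
      rw [PySem.Chars.splitOn.go.eq_def]
      simp
    | cons c rest =>
      rw [PySem.Chars.splitOn.go.eq_def]
      simp only []
      split_ifs with hp
      · have hsl : 1 ≤ sep.length := by
          cases sep with
          | nil => exact absurd rfl hsep
          | cons _ _ => simp
        have hlen : (List.drop sep.length (c :: rest)).length < fuel := by
          simp only [List.length_drop, List.length_cons] at *
          omega
        rw [ih _ _ _ hlen]
        simp only [List.reverse_cons, List.reverse_nil, List.nil_append]
        rw [show acc.reverse ++ [cur.reverse] ++ [List.drop sep.length (c :: rest)]
              = acc.reverse ++ [cur.reverse, List.drop sep.length (c :: rest)] by simp]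
        rw [pvJoinSnoc2]
        have hdec : sep ++ List.drop sep.length (c :: rest) = c :: rest :=
          (List.prefix_iff_eq_append).mp (List.isPrefixOf_iff_prefix.mp hp)
        rw [List.append_assoc cur.reverse sep, hdec]
      · have hlen : rest.length < fuel := by simp at h; omega
        rw [ih _ _ _ hlen]
        simp

lemma pvRoundtrip (s : List Char) (sep : List Char) (hsep : sep ≠ []) :
    PySem.Chars.join sep (PySem.Chars.splitOn s sep) = s := by
  unfold PySem.Chars.splitOn
  rw [pvGoJoin sep hsep (s.length + 1) s [] [] (by omega)]
  simp [PySem.Chars.join_singleton]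

lemma pvRangeMapTake (l : List String) (k : Nat) (hk : k ≤ l.length) :
    (List.range k).map (fun j => l.getD j "") = l.take k := by
  induction k with
  | zero => simp
  | succ k ih =>
    rw [List.range_succ, List.map_append, ih (by omega), List.take_add_one]
    have hgk : l[k]? = some l[k] := List.getElem?_eq_getElem (by omega)
    simp [hgk, List.getD]

lemma pvInner (l : List String) (k : Nat) (hk : k ≤ l.length) :
    List.map (fun j => PySem.List.pyGetD l j "") (PySem.List.pyRange 0 (k : Int)) = l.take k := by
  rw [PySem.List.pyRange_zero_natCast, List.map_map, ← pvRangeMapTake l k hk]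
  exact List.map_congr_left (fun j _ => PySem.List.pyGetD_natCast l j "")

-- A's nested loop builds, for each '0' token, the whole token prefix
lemma pvAval5 (l : List String) :
    (PySem.List.pyRange 0 (l.length : Int) 1).foldl
      (fun acc i =>
        if PySem.List.pyGetD l i "" == "0" then
          (PySem.List.pyRange 0 i 1).foldl (fun a j => a ++ [PySem.List.pyGetD l j ""]) acc
        else acc) []
    = (List.range l.length).flatMap (fun k => if l.getD k "" == "0" then l.take k else []) := by
  rw [PySem.List.pyRange_zero_natCast, List.foldl_map]
  have hbody : ∀ (acc : List String), ∀ k ∈ List.range l.length,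
      (if PySem.List.pyGetD l (k : Int) "" == "0" then
        (PySem.List.pyRange 0 (k : Int) 1).foldl (fun a j => a ++ [PySem.List.pyGetD l j ""]) acc
      else acc)
      = acc ++ (if l.getD k "" == "0" then l.take k else []) := by
    intro acc k hk
    rw [List.mem_range] at hk
    rw [PySem.List.pyGetD_natCast]
    split_ifs with hc
    · rw [PySem.List.foldl_append_singleton_eq_map, pvInner l k (by omega)]
    · simp
  trans (List.range l.length).foldl
      (fun acc k => acc ++ (if l.getD k "" == "0" then l.take k else [])) []
  · apply PySem.List.foldl_congr_mem
    intro acc k hk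
    exact hbody acc k hk
  · rw [PySem.List.foldl_append_eq_flatMap]
    simp

lemma pvFlatMapCongr {α β : Type} (ks : List α) (f g : α → List β)
    (h : ∀ k ∈ ks, f k = g k) : ks.flatMap f = ks.flatMap g := by
  induction ks with
  | nil => rfl
  | cons k ks ih =>
    simp only [List.flatMap_cons, h k (by simp), ih (fun x hx => h x (by simp [hx]))]

-- B's single pass: final offset and one slice per late '0' token
lemma pvBfold (s : String) (l : List String) :
    l.foldl
      (fun st tok =>
        (st.1 + PySem.Str.len tok + 1,
         if tok == "0" && decide ((0:Int) < st.1) then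
           st.2 ++ [PySem.Str.slice s none (some (st.1 - 1))]
         else st.2))
      ((0 : Int), ([] : List String))
    = (pvPos l l.length,
       (List.range l.length).flatMap (fun k =>
         if (l.getD k "" == "0") && decide ((0:Int) < pvPos l k) then
           [PySem.Str.slice s none (some (pvPos l k - 1))]
         else [])) := by
  induction l using List.reverseRecOn with
  | nil => simp [pvPos]
  | append_singleton l x ih =>
    rw [List.foldl_append, ih]
    simp only [List.foldl_cons, List.foldl_nil]
    have hn : (l ++ [x]).length = l.length + 1 := by simp
    have hposk : ∀ k : Nat, k ≤ l.length → pvPos (l ++ [x]) k = pvPos l k := by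
      intro k hk
      simp [pvPos, List.take_append_of_le_length hk]
    have hgetk : ∀ k : Nat, k < l.length → (l ++ [x]).getD k "" = l.getD k "" := by
      intro k hk
      simp [List.getD, List.getElem?_append_left hk]
    have hgetn : (l ++ [x]).getD l.length "" = x := by
      simp [List.getD]
    have hposn : pvPos (l ++ [x]) (l.length + 1) = pvPos l l.length + PySem.Str.len x + 1 := by
      simp [pvPos, List.take_of_length_le (show (l ++ [x]).length ≤ l.length + 1 by simp),
        PySem.Str.len]
      ring
    apply Prod.ext
    · rw [hn, hposn]
    · have hcong : (List.range l.length).flatMap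
            (fun k => if ((l ++ [x]).getD k "" == "0") && decide ((0:Int) < pvPos (l ++ [x]) k) then
               [PySem.Str.slice s none (some (pvPos (l ++ [x]) k - 1))] else [])
          = (List.range l.length).flatMap
            (fun k => if (l.getD k "" == "0") && decide ((0:Int) < pvPos l k) then
               [PySem.Str.slice s none (some (pvPos l k - 1))] else []) := by
        apply pvFlatMapCongr
        intro k hk
        rw [List.mem_range] at hk
        rw [hgetk k hk, hposk k (by omega)]
      rw [hn, List.range_succ, List.flatMap_append, hcong]
      simp only [List.flatMap_cons, List.flatMap_nil, List.append_nil, hgetn,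
        hposk l.length (le_refl _)]
      split <;> simp

lemma pvPos_sum_nonneg (l : List String) (k : Nat) :
    0 ≤ ((l.take k).map PySem.Str.len).sum := by
  apply List.sum_nonneg
  intro x hx
  simp only [List.mem_map] at hx
  obtain ⟨t, _, rfl⟩ := hx
  simp [PySem.Str.len]

lemma pvPos_pos_iff (l : List String) (k : Nat) : (0 < pvPos l k) ↔ 0 < k := by
  cases k with
  | zero => simp [pvPos]
  | succ k =>
    unfold pvPos
    have hsum := pvPos_sum_nonneg l (k + 1)
    constructor
    · intro _; omega
    · intro _; omega

lemma pvJoinLen (xs : List String) (h : xs ≠ []) :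
    ((PySem.Chars.join [','] (xs.map String.toList)).length : Int)
      = (xs.map PySem.Str.len).sum + xs.length - 1 := by
  induction xs with
  | nil => exact absurd rfl h
  | cons x xs ih =>
    cases xs with
    | nil => simp [PySem.Chars.join_singleton, PySem.Str.len]
    | cons y t =>
      rw [List.map_cons, List.map_cons, PySem.Chars.join_cons_cons]
      have hih := ih (by simp)
      simp only [List.map_cons] at hih
      simp only [List.length_append, List.length_cons, List.length_nil, List.map_cons,
        List.sum_cons, PySem.Str.len] at hih ⊢
      push_cast at hih ⊢
      omega

lemma pvSliceEq (s : String) (l : List String) (k : Nat)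
    (hs : s.toList = PySem.Chars.join [','] (l.map String.toList))
    (hk0 : 0 < k) (hkn : k < l.length) :
    PySem.Str.slice s none (some (pvPos l k - 1)) = PySem.Str.join "," (l.take k) := by
  have hpos : 0 < pvPos l k := (pvPos_pos_iff l k).mpr hk0
  have hAlen : (l.take k).length = k := by simp; omega
  have hAne : l.take k ≠ [] := by
    intro hc
    rw [hc] at hAlen
    simp at hAlen
    omega
  have hBne : l.drop k ≠ [] := by
    intro hc
    have := congrArg List.length hc
    simp at this
    omega
  have hmapA : (l.take k).map String.toList ≠ [] := by simpa using hAne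
  have hmapB : (l.drop k).map String.toList ≠ [] := by simpa using hBne
  have hmap : l.map String.toList
      = (l.take k).map String.toList ++ (l.drop k).map String.toList := by
    rw [← List.map_append, List.take_append_drop]
  have hs2 : s.toList = PySem.Chars.join [','] ((l.take k).map String.toList)
      ++ [','] ++ PySem.Chars.join [','] ((l.drop k).map String.toList) := by
    rw [hs, hmap, pvJoinAppend [','] _ _ hmapA hmapB]
  have hlenA : ((PySem.Chars.join [','] ((l.take k).map String.toList)).length : Int)
      = pvPos l k - 1 := by
    rw [pvJoinLen (l.take k) hAne]
    unfold pvPos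
    rw [hAlen]
  have htoNat : (pvPos l k - 1).toNat
      = (PySem.Chars.join [','] ((l.take k).map String.toList)).length := by
    omega
  unfold PySem.Str.slice PySem.Str.join
  congr 1
  rw [PySem.Chars.slice_eq_listSlice,
      PySem.List.slice_to s.toList (b := pvPos l k - 1) (by omega),
      show (String.toList ",") = [','] from rfl, hs2, htoNat, List.append_assoc,
      List.take_left]

lemma pvFlatMapIte {α β : Type} (p : α → Bool) (g : α → List β) (ks : List α) :
    ks.flatMap (fun k => if p k then g k else []) = (ks.filter p).flatMap g := by
  induction ks with
  | nil => rfl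
  | cons k ks ih =>
    by_cases h : p k <;> simp [h, ih]

lemma pvFlatMapSing {α β : Type} (p : α → Bool) (h : α → β) (ks : List α) :
    ks.flatMap (fun k => if p k then [h k] else []) = (ks.filter p).map h := by
  rw [pvFlatMapIte p (fun k => [h k]) ks]
  generalize ks.filter p = xs
  induction xs with
  | nil => rfl
  | cons a t ih => simp [ih]

lemma pvFlatMapFilter {α β : Type} (q : α → Bool) (g : α → List β) (ks : List α)
    (h : ∀ k ∈ ks, q k = false → g k = []) : ks.flatMap g = (ks.filter q).flatMap g := by
  induction ks with
  | nil => rfl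
  | cons k ks ih =>
    by_cases hq : q k
    · simp [hq, ih (fun x hx => h x (by simp [hx]))]
    · simp only [List.flatMap_cons, h k (by simp) (by simp [hq]), List.filter_cons,
        Bool.not_eq_true] at *
      simp [hq, ih (fun x hx => h x (by simp [hx]))]

lemma pvJoinFlat (sep : List Char) {α : Type} (ks : List α) (F : α → List (List Char))
    (h : ∀ k ∈ ks, F k ≠ []) :
    PySem.Chars.join sep (ks.flatMap F) =
    PySem.Chars.join sep (ks.map (fun k => PySem.Chars.join sep (F k))) := by
  induction ks with
  | nil => rfl
  | cons k ks ih =>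
    cases ks with
    | nil => simp [PySem.Chars.join_singleton]
    | cons k' t =>
      have hflat : (k' :: t).flatMap F ≠ [] := by
        simp only [List.flatMap_cons]
        intro hc
        exact h k' (by simp) (List.append_eq_nil_iff.mp hc).1
      rw [List.flatMap_cons, pvJoinAppend sep (F k) _ (h k (by simp)) hflat,
          ih (fun x hx => h x (List.mem_cons_of_mem _ hx))]
      simp [PySem.Chars.join_cons_cons]

lemma pvJoinFlatStr (ks : List Nat) (l : List String) (h : ∀ k ∈ ks, l.take k ≠ []) :
    PySem.Str.join "," (ks.flatMap (fun k => l.take k))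
      = PySem.Str.join "," (ks.map (fun k => PySem.Str.join "," (l.take k))) := by
  unfold PySem.Str.join
  congr 1
  rw [show (String.toList ",") = [','] from rfl]
  rw [List.map_flatMap, List.map_map]
  have hF : ∀ k ∈ ks, (l.take k).map String.toList ≠ [] := by
    intro k hk
    simpa using h k hk
  rw [pvJoinFlat [','] ks (fun k => (l.take k).map String.toList) hF]
  congr 1
  apply List.map_congr_left
  intro k _
  simp [Function.comp]

-- the central equality: A's val6 equals B's val6
set_option maxHeartbeats 1000000 in
lemma pvMain (val2 : List String) :
    PySem.Str.join ","
      ((PySem.List.pyRange 0 (((PySem.Str.split? (PySem.Str.join "," val2) ",").getD []).length : Int) 1).foldl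
        (fun acc i =>
          if PySem.List.pyGetD ((PySem.Str.split? (PySem.Str.join "," val2) ",").getD []) i "" == "0" then
            (PySem.List.pyRange 0 i 1).foldl
              (fun a j => a ++ [PySem.List.pyGetD ((PySem.Str.split? (PySem.Str.join "," val2) ",").getD []) j ""]) acc
          else acc) [])
    = PySem.Str.join ","
        (((PySem.Str.split? (PySem.Str.join "," val2) ",").getD []).foldl
          (fun st tok =>
            (st.1 + PySem.Str.len tok + 1,
             if tok == "0" && decide ((0:Int) < st.1) then
               st.2 ++ [PySem.Str.slice (PySem.Str.join "," val2) none (some (st.1 - 1))]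
             else st.2))
          ((0 : Int), ([] : List String))).2 := by
  set s : String := PySem.Str.join "," val2 with hsdef
  set l : List String := (PySem.Str.split? s ",").getD [] with hldef
  have hsplit : l = (PySem.Chars.splitOn s.toList [',']).map String.ofList := by
    rw [hldef]
    simp [PySem.Str.split?, PySem.Chars.split?]
  have hs : s.toList = PySem.Chars.join [','] (l.map String.toList) := by
    rw [hsplit, List.map_map]
    have hcomp : (PySem.Chars.splitOn s.toList [',']).map (String.toList ∘ String.ofList)
        = PySem.Chars.splitOn s.toList [','] := by
      simp [Function.comp_def]
    rw [hcomp, pvRoundtrip s.toList [','] (by simp)]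
  rw [pvAval5 l, pvBfold s l]
  simp only []
  have step1 : (List.range l.length).flatMap
        (fun k => if l.getD k "" == "0" then l.take k else [])
      = ((List.range l.length).filter (fun k => l.getD k "" == "0")).flatMap
          (fun k => l.take k) := pvFlatMapIte _ _ _
  have step2 : ((List.range l.length).filter (fun k => l.getD k "" == "0")).flatMap
          (fun k => l.take k)
      = (((List.range l.length).filter (fun k => l.getD k "" == "0")).filter
            (fun k => decide (0 < k))).flatMap (fun k => l.take k) := by
    apply pvFlatMapFilter
    intro k hk hq
    have hk0 : k = 0 := by
      by_contra hne
      simp [Nat.pos_of_ne_zero hne] at hq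
    rw [hk0]
    rfl
  have step3 : (List.range l.length).flatMap
        (fun k => if (l.getD k "" == "0") && decide ((0:Int) < pvPos l k) then
            [PySem.Str.slice s none (some (pvPos l k - 1))] else [])
      = (List.range l.length).flatMap
        (fun k => if (l.getD k "" == "0") && decide (0 < k) then
            [PySem.Str.slice s none (some (pvPos l k - 1))] else []) := by
    apply pvFlatMapCongr
    intro k hk
    have : decide ((0:Int) < pvPos l k) = decide (0 < k) := by
      simp [pvPos_pos_iff l k]
    rw [this]
  have step4 : (List.range l.length).flatMap
        (fun k => if (l.getD k "" == "0") && decide (0 < k) then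
            [PySem.Str.slice s none (some (pvPos l k - 1))] else [])
      = ((List.range l.length).filter
            (fun k => (l.getD k "" == "0") && decide (0 < k))).map
          (fun k => PySem.Str.slice s none (some (pvPos l k - 1))) :=
    pvFlatMapSing _ _ _
  have step5 : (List.range l.length).filter
        (fun k => (l.getD k "" == "0") && decide (0 < k))
      = ((List.range l.length).filter (fun k => l.getD k "" == "0")).filter
          (fun k => decide (0 < k)) := by
    rw [List.filter_filter]
    apply List.filter_congr
    intro k _
    rw [Bool.and_comm]
  have hmem : ∀ k ∈ ((List.range l.length).filter (fun k => l.getD k "" == "0")).filter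
      (fun k => decide (0 < k)), 0 < k ∧ k < l.length := by
    intro k hk
    rw [List.mem_filter] at hk
    obtain ⟨hk1, hk2⟩ := hk
    rw [List.mem_filter] at hk1
    rw [List.mem_range] at hk1
    exact ⟨by simpa using hk2, hk1.1⟩
  have step6 : (((List.range l.length).filter (fun k => l.getD k "" == "0")).filter
          (fun k => decide (0 < k))).map
        (fun k => PySem.Str.slice s none (some (pvPos l k - 1)))
      = (((List.range l.length).filter (fun k => l.getD k "" == "0")).filter
          (fun k => decide (0 < k))).map
        (fun k => PySem.Str.join "," (l.take k)) := by
    apply List.map_congr_left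
    intro k hk
    exact pvSliceEq s l k hs (hmem k hk).1 (hmem k hk).2
  rw [step1, step2, step3, step4, step5, step6]
  apply pvJoinFlatStr
  intro k hk
  obtain ⟨hk0, hkn⟩ := hmem k hk
  have hlen : (l.take k).length = k := by simp; omega
  intro hc
  rw [hc] at hlen
  simp at hlen
  omega

-- ===== VERDICT (by name: the statement is the Claim_ definition above) =====
theorem constr_spec : Claim_equal_constr := by
  intro val2 _
  unfold Spec_constr constr constr_alt
  simp only []
  rw [pvMain]
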